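-- pv_equiv track=rewrite | github.com/Ewulino/beadando | 3.feladat.py | nothing
-- ===== SOURCE A (Python) =====
-- def nothing(ertek,one_zero):  # összevonja a számokat és 2vagy többszámjegyűt hoz létre 1-9iig
--     idx_i = 0 # ertek indexei
--     idx_j = 0  # one_zero indexei
--     size = len(ertek)
--     result = []
--     kezdoertek = ertek[0]
--     while idx_i < size:   # ameddig ertek indexe kisebb mint az ertek hossza
--         if idx_i + 1 >= size:
--             result.append(kezdoertek)
--             break
--         new_value = ertek[idx_i + 1]
--         if one_zero[idx_j] == 0:   #  one_zero indexén lévő szám egyenlő nullával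
--             result.append(kezdoertek)
--             kezdoertek= new_value
--         else:
--             kezdoertek= kezdoertek * 10 + new_value  # ertek[0]*10 és hozzáadja az ertek[1] elemét azaz a következőt
--         idx_i += 1
--         idx_j += 1
--     return result
-- ===== SOURCE B (Python) =====
-- def nothing(ertek, one_zero):
--     # Two passes: first group the digits into segments per the flags,
--     # then evaluate each segment as a base-10 number.
--     segments = []
--     current = [ertek[0]]
--     for i in range(len(ertek) - 1):
--         if one_zero[i] == 0:
--             segments.append(current)
--             current = [ertek[i + 1]]
--         else:
--             current.append(ertek[i + 1])
--     segments.append(current)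
--     out = []
--     for seg in segments:
--         acc = 0
--         for d in seg:
--             acc = acc * 10 + d
--         out.append(acc)
--     return out
-- ===== Notes on version B (the rewrite author's own statement) =====
-- stated objective: alternative
-- what changed: Replaces A's single index-walking while-loop that merges on the fly with a two-pass decomposition: first build the list of digit segments dictated by the flags, then evaluate each segment as a base-10 number in a second pass.
import Mathlib
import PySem

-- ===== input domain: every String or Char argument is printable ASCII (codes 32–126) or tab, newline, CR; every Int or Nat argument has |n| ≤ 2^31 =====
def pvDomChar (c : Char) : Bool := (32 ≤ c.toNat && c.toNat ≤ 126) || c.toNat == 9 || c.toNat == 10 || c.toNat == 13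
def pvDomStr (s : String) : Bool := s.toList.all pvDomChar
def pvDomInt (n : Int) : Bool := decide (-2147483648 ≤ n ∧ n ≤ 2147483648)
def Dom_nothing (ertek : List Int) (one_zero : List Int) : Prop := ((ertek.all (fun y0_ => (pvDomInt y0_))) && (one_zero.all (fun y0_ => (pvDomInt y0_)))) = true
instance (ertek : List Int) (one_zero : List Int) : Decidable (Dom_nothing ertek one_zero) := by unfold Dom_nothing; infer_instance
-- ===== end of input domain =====

-- B replaces A's single index-walking merge loop with a two-pass decomposition
-- (build flag-delimited segments, then evaluate each as a base-10 number); same cost.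

-- ===== PORT A =====
-- the while loop of A, step for step (idx_i = idx_j = idx); the `none` branches
-- are the IndexError cases, excluded by Pre_nothing
def nothingLoop (ertek one_zero : List Int) (size idx : Nat) (kezdo : Int)
    (result : List Int) : List Int :=
  if idx < size then
    if idx + 1 ≥ size then result ++ [kezdo]
    else
      match PySem.List.pyGet? ertek ((idx : Int) + 1), PySem.List.pyGet? one_zero (idx : Int) with
      | some new_value, some fl =>
        if fl == 0 then
          nothingLoop ertek one_zero size (idx + 1) new_value (result ++ [kezdo])
        else
          nothingLoop ertek one_zero size (idx + 1) (kezdo * 10 + new_value) result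
      | _, _ => result
  else result
termination_by size - idx

def nothing (ertek : List Int) (one_zero : List Int) : List Int :=
  match PySem.List.pyGet? ertek 0 with
  | some kezdoertek => nothingLoop ertek one_zero ertek.length 0 kezdoertek []
  | none => []  -- ertek[0] raises IndexError; excluded by Pre_nothing

-- ===== PORT B =====
-- pass 1 of Source B: the segments and the final `current`
def nothingSegs (ertek one_zero : List Int) : List (List Int) × List Int :=
  match PySem.List.pyGet? ertek 0 with
  | none => ([], [])  -- ertek[0] raises IndexError; excluded by Pre_nothing
  | some k =>
    (PySem.List.pyRange 0 ((ertek.length : Int) - 1) 1).foldl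
      (fun st i =>
        match PySem.List.pyGet? one_zero i, PySem.List.pyGet? ertek (i + 1) with
        | some fl, some nv =>
          if fl == 0 then (st.1 ++ [st.2], [nv]) else (st.1, st.2 ++ [nv])
        | _, _ => st)
      ([], [k])

def nothing_alt (ertek : List Int) (one_zero : List Int) : List Int :=
  let sc := nothingSegs ertek one_zero
  (sc.1 ++ [sc.2]).map (fun seg => seg.foldl (fun a d => a * 10 + d) 0)

-- ===== PRECONDITION & SPEC =====
-- Pre_ excludes exactly the inputs on which A raises IndexError: empty ertek
-- (ertek[0]) or one_zero shorter than len(ertek)-1 (one_zero[idx_j])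
def Pre_nothing (ertek : List Int) (one_zero : List Int) : Prop :=
  ertek ≠ [] ∧ ertek.length - 1 ≤ one_zero.length

instance (ertek : List Int) (one_zero : List Int) : Decidable (Pre_nothing ertek one_zero) := by
  unfold Pre_nothing; infer_instance

def pvWitness_nothing : List Int × List Int := ([1, 2, 3, 4], [1, 0, 1])

def Spec_nothing (ertek : List Int) (one_zero : List Int) (out : List Int) : Prop :=
  out = nothing_alt ertek one_zero
instance (ertek : List Int) (one_zero : List Int) (out : List Int) : Decidable (Spec_nothing ertek one_zero out) := by unfold Spec_nothing; infer_instance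

-- ===== CLAIM (what is proved, stated in full; the proofs are below) =====
def Claim_equal_nothing : Prop := ∀ (ertek : List Int) (one_zero : List Int), Dom_nothing ertek one_zero → Pre_nothing ertek one_zero → Spec_nothing ertek one_zero (nothing ertek one_zero)

-- ===== LEMMAS AND PROOFS =====

-- reference recursion both ports are reduced to
def mergeList (kezdo : Int) : List Int → List Int → List Int
  | [], _ => [kezdo]
  | nv :: rest, fl :: flags =>
    if fl == 0 then kezdo :: mergeList nv rest flags
    else mergeList (kezdo * 10 + nv) rest flags
  | _ :: _, [] => [kezdo]  -- unreachable under Pre_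

def evalSeg (seg : List Int) : Int := seg.foldl (fun a d => a * 10 + d) 0

def segList (cur : List Int) : List Int → List Int → List (List Int)
  | [], _ => [cur]
  | nv :: rest, fl :: flags =>
    if fl == 0 then cur :: segList [nv] rest flags
    else segList (cur ++ [nv]) rest flags
  | _ :: _, [] => [cur]  -- unreachable under Pre_

theorem map_evalSeg_segList (cur : List Int) (rest flags : List Int) :
    (segList cur rest flags).map evalSeg = mergeList (evalSeg cur) rest flags := by
  induction rest generalizing cur flags with
  | nil => simp [segList, mergeList]
  | cons nv r ih =>
    cases flags with
    | nil => simp [segList, mergeList]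
    | cons fl fs =>
      by_cases h : fl = 0 <;>
        simp [segList, mergeList, h, ih, evalSeg]

theorem nothingLoop_eq (ertek one_zero : List Int) (idx : Nat) (kezdo : Int)
    (result : List Int)
    (hpre : ertek.length - 1 ≤ one_zero.length) (hidx : idx < ertek.length) :
    nothingLoop ertek one_zero ertek.length idx kezdo result =
      result ++ mergeList kezdo (ertek.drop (idx + 1)) (one_zero.drop idx) := by
  induction hn : ertek.length - idx generalizing idx kezdo result with
  | zero => omega
  | succ n ih =>
    rw [nothingLoop]
    by_cases hlast : idx + 1 ≥ ertek.length
    · have hd : ertek.drop (idx + 1) = [] := by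
        apply List.drop_eq_nil_of_le; omega
      simp [hidx, hlast, hd, mergeList]
    · have h1 : idx + 1 < ertek.length := by omega
      have h2 : idx < one_zero.length := by omega
      have he : PySem.List.pyGet? ertek ((idx : Int) + 1) = some ertek[idx + 1] := by
        have := PySem.List.pyGet?_natCast (xs := ertek) (n := idx + 1)
        push_cast at this
        rw [this, List.getElem?_eq_getElem h1]
      have hz : PySem.List.pyGet? one_zero (idx : Int) = some one_zero[idx] := by
        rw [PySem.List.pyGet?_natCast, List.getElem?_eq_getElem h2]
      have hde : ertek.drop (idx + 1) = ertek[idx + 1] :: ertek.drop (idx + 2) := by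
        rw [List.drop_eq_getElem_cons h1]
      have hdz : one_zero.drop idx = one_zero[idx] :: one_zero.drop (idx + 1) := by
        rw [List.drop_eq_getElem_cons h2]
      simp only [hidx, if_true, hlast, if_false, he, hz]
      rw [hde, hdz]
      by_cases h0 : one_zero[idx] = 0
      · simp only [h0, beq_self_eq_true, if_true, mergeList]
        rw [ih (idx + 1) _ _ h1 (by omega)]
        simp
      · simp only [mergeList, beq_iff_eq, h0, if_false]
        exact ih (idx + 1) _ _ h1 (by omega)

theorem nothingSegs_fold_eq (ertek one_zero : List Int) (j : Nat) (segs : List (List Int))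
    (cur : List Int)
    (hpre : ertek.length - 1 ≤ one_zero.length) (hj : j ≤ ertek.length - 1) :
    (((PySem.List.pyRange (j : Int) ((ertek.length : Int) - 1) 1).foldl
      (fun st i =>
        match PySem.List.pyGet? one_zero i, PySem.List.pyGet? ertek (i + 1) with
        | some fl, some nv =>
          if fl == 0 then (st.1 ++ [st.2], [nv]) else (st.1, st.2 ++ [nv])
        | _, _ => st)
      (segs, cur)).1 ++
      [((PySem.List.pyRange (j : Int) ((ertek.length : Int) - 1) 1).foldl
      (fun st i =>
        match PySem.List.pyGet? one_zero i, PySem.List.pyGet? ertek (i + 1) with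
        | some fl, some nv =>
          if fl == 0 then (st.1 ++ [st.2], [nv]) else (st.1, st.2 ++ [nv])
        | _, _ => st)
      (segs, cur)).2]) =
      segs ++ segList cur (ertek.drop (j + 1)) (one_zero.drop j) := by
  induction hn : ertek.length - 1 - j generalizing j segs cur with
  | zero =>
    have hempty : PySem.List.pyRange (j : Int) ((ertek.length : Int) - 1) 1 = [] := by
      rw [PySem.List.pyRange_one]
      have : (((ertek.length : Int) - 1) - (j : Int)).toNat = 0 := by omega
      simp [this]
    have hd : ertek.drop (j + 1) = [] := by
      apply List.drop_eq_nil_of_le; omega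
    simp [hempty, hd, segList]
  | succ n ih =>
    have hjlt : (j : Int) < (ertek.length : Int) - 1 := by omega
    rw [PySem.List.pyRange_one_cons hjlt]
    have h1 : j + 1 < ertek.length := by omega
    have h2 : j < one_zero.length := by omega
    have he : PySem.List.pyGet? ertek ((j : Int) + 1) = some ertek[j + 1] := by
      have := PySem.List.pyGet?_natCast (xs := ertek) (n := j + 1)
      push_cast at this
      rw [this, List.getElem?_eq_getElem h1]
    have hz : PySem.List.pyGet? one_zero (j : Int) = some one_zero[j] := by
      rw [PySem.List.pyGet?_natCast, List.getElem?_eq_getElem h2]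
    have hde : ertek.drop (j + 1) = ertek[j + 1] :: ertek.drop (j + 2) := by
      rw [List.drop_eq_getElem_cons h1]
    have hdz : one_zero.drop j = one_zero[j] :: one_zero.drop (j + 1) := by
      rw [List.drop_eq_getElem_cons h2]
    have hcast : (j : Int) + 1 = ((j + 1 : Nat) : Int) := by push_cast; ring
    rw [List.foldl_cons]
    simp only [hz, he]
    rw [hde, hdz]
    by_cases h0 : one_zero[j] = 0
    · have hb : (one_zero[j] == 0) = true := by simp [h0]
      simp only [hb, if_true, segList]
      rw [hcast, ih (j + 1) _ _ (by omega) (by omega)]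
      simp
    · have hb : (one_zero[j] == 0) = false := by simp [h0]
      simp only [hb, Bool.false_eq_true, if_false, segList]
      rw [hcast, ih (j + 1) _ _ (by omega) (by omega)]

-- ===== VERDICT (by name: the statement is the Claim_ definition above) =====
theorem nothing_spec : Claim_equal_nothing := by
  intro ertek one_zero _ hpre
  obtain ⟨hne, hlen⟩ := hpre
  obtain ⟨k, rest, rfl⟩ : ∃ k rest, ertek = k :: rest := by
    cases ertek with
    | nil => exact absurd rfl hne
    | cons k rest => exact ⟨k, rest, rfl⟩
  show nothing _ _ = nothing_alt _ _
  have hk : PySem.List.pyGet? (k :: rest) 0 = some k := by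
    simp
  rw [nothing, nothing_alt, nothingSegs, hk]
  simp only []
  rw [nothingLoop_eq _ _ 0 k [] hlen (by simp)]
  have hfold := nothingSegs_fold_eq (k :: rest) one_zero 0 [] [k] hlen (by omega)
  simp only [Nat.cast_zero] at hfold
  rw [hfold]
  have hev : (fun seg : List Int => List.foldl (fun a d => a * 10 + d) 0 seg) = evalSeg := rfl
  rw [hev]
  simp only [List.nil_append, map_evalSeg_segList]
  have : evalSeg [k] = k := by simp [evalSeg]
  rw [this]
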